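-- pv_equiv track=rewrite | github.com/avishkarmaitra04/AI-Smart-Waste-Segregation | method1_rule_based.py | classify_rule_based
-- ===== SOURCE A (Python) =====
-- wet_keywords = ["food", "fruit", "vegetable", "peel", "tea", "coffee", "egg"]
--
-- dry_keywords = ["plastic", "paper", "cardboard", "glass", "metal", "tin", "foil"]
--
-- ewaste_keywords = ["battery", "mobile", "charger", "laptop", "earphone",
--                    "keyboard", "mouse", "power", "circuit"]
--
-- def classify_rule_based(item):
--     item = item.lower()
--
--     wet_score = sum(word in item for word in wet_keywords)
--     dry_score = sum(word in item for word in dry_keywords)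
--     ewaste_score = sum(word in item for word in ewaste_keywords)
--
--     if wet_score > dry_score and wet_score > ewaste_score:
--         return "wet"
--     elif dry_score > wet_score and dry_score > ewaste_score:
--         return "dry"
--     elif ewaste_score > wet_score and ewaste_score > dry_score:
--         return "e-waste"
--     else:
--         return "unknown"
-- ===== SOURCE B (Python) =====
-- KEYWORD_LABELS = [
--     ("food", "wet"), ("fruit", "wet"), ("vegetable", "wet"), ("peel", "wet"),
--     ("tea", "wet"), ("coffee", "wet"), ("egg", "wet"),
--     ("plastic", "dry"), ("paper", "dry"), ("cardboard", "dry"), ("glass", "dry"),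
--     ("metal", "dry"), ("tin", "dry"), ("foil", "dry"),
--     ("battery", "e-waste"), ("mobile", "e-waste"), ("charger", "e-waste"),
--     ("laptop", "e-waste"), ("earphone", "e-waste"), ("keyboard", "e-waste"),
--     ("mouse", "e-waste"), ("power", "e-waste"), ("circuit", "e-waste"),
-- ]
--
-- LABELS = ["wet", "dry", "e-waste"]
--
--
-- def classify_rule_based(item):
--     item = item.lower()
--     # single left-to-right scan of the text: at each offset record which
--     # keywords start there (naive multi-pattern text scan)
--     found = set()
--     for i in range(len(item)):
--         tail = item[i:]
--         for w, _ in KEYWORD_LABELS: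
--             if tail.startswith(w):
--                 found.add(w)
--     # running unique-argmax fold over the labels
--     best_label, best, unique = "unknown", None, False
--     for lab in LABELS:
--         c = sum(1 for w, l in KEYWORD_LABELS if l == lab and w in found)
--         if best is None or c > best:
--             best_label, best, unique = lab, c, True
--         elif c == best:
--             unique = False
--     return best_label if unique else "unknown"
-- ===== Notes on version B (the rewrite author's own statement) =====
-- stated objective: alternative
-- what changed: Instead of three per-category substring-membership passes and a pairwise if/elif chain, B makes a single left-to-right scan of the text collecting, at each offset, the keywords of a flat keyword-to-label table that start there into a found-set, then picks the label by a running unique-argmax fold with a tie flag.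
import Mathlib
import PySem

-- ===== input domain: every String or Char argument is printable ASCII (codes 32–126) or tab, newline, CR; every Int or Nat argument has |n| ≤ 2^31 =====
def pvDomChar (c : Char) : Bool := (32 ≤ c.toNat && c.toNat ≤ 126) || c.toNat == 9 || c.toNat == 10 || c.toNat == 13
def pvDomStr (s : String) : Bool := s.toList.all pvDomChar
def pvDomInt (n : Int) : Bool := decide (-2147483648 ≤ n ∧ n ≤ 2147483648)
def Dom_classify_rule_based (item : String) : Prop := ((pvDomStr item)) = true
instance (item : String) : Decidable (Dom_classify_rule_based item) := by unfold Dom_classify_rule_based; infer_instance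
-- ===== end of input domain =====

-- B replaces A's three per-category substring passes and if/elif chain by a single
-- left-to-right scan of the text collecting matched keywords from a flat keyword→label
-- table, followed by a running unique-argmax fold over the labels (objective: alternative).

-- ===== PORT A =====
def wet_keywords : List String :=
  ["food", "fruit", "vegetable", "peel", "tea", "coffee", "egg"]

def dry_keywords : List String :=
  ["plastic", "paper", "cardboard", "glass", "metal", "tin", "foil"]

def ewaste_keywords : List String :=
  ["battery", "mobile", "charger", "laptop", "earphone",
   "keyboard", "mouse", "power", "circuit"]

def classify_rule_based (item : String) : String :=
  let item := PySem.Str.lower item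
  let wet_score : Int :=
    (wet_keywords.map (fun w => if PySem.Str.isIn w item then (1 : Int) else 0)).sum
  let dry_score : Int :=
    (dry_keywords.map (fun w => if PySem.Str.isIn w item then (1 : Int) else 0)).sum
  let ewaste_score : Int :=
    (ewaste_keywords.map (fun w => if PySem.Str.isIn w item then (1 : Int) else 0)).sum
  if wet_score > dry_score ∧ wet_score > ewaste_score then "wet"
  else if dry_score > wet_score ∧ dry_score > ewaste_score then "dry"
  else if ewaste_score > wet_score ∧ ewaste_score > dry_score then "e-waste"
  else "unknown"

-- ===== PORT B =====
def kwLabels : List (String × String) :=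
  [("food", "wet"), ("fruit", "wet"), ("vegetable", "wet"), ("peel", "wet"),
   ("tea", "wet"), ("coffee", "wet"), ("egg", "wet"),
   ("plastic", "dry"), ("paper", "dry"), ("cardboard", "dry"), ("glass", "dry"),
   ("metal", "dry"), ("tin", "dry"), ("foil", "dry"),
   ("battery", "e-waste"), ("mobile", "e-waste"), ("charger", "e-waste"),
   ("laptop", "e-waste"), ("earphone", "e-waste"), ("keyboard", "e-waste"),
   ("mouse", "e-waste"), ("power", "e-waste"), ("circuit", "e-waste")]

def labelsB : List String := ["wet", "dry", "e-waste"]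

-- body of B's inner keyword loop at one text offset (tail = item[i:];
-- tail.startswith(w) is PySem.Chars.startswith, exact)
def innerScan (tail : List Char) (f : PySem.Set String) : PySem.Set String :=
  kwLabels.foldl
    (fun f p => if PySem.Chars.startswith tail p.1.toList then PySem.Set.add f p.1 else f) f

-- B's text scan: for i in range(len(item)): … (item[i:] with 0 ≤ i is List.drop i)
def scanFound (cs : List Char) : PySem.Set String :=
  (PySem.List.pyRange 0 (cs.length : Int) 1).foldl
    (fun f i => innerScan (cs.drop i.toNat) f) PySem.Set.empty

-- c = sum(1 for w, l in KEYWORD_LABELS if l == lab and w in found)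
def labScore (found : PySem.Set String) (lab : String) : Int :=
  (kwLabels.countP (fun p => p.2 == lab && decide (p.1 ∈ found)) : Int)

-- B's running unique-argmax fold over the labels
def pickFold (found : PySem.Set String) : String × Option Int × Bool :=
  labelsB.foldl
    (fun st lab =>
      let c := labScore found lab
      match st.2.1 with
      | none => (lab, some c, true)
      | some b =>
          if b < c then (lab, some c, true)
          else if c == b then (st.1, some b, false)
          else st)
    ("unknown", none, false)

def classify_rule_based_alt (item : String) : String :=
  let cs := PySem.Chars.lower item.toList
  let st := pickFold (scanFound cs)
  if st.2.2 then st.1 else "unknown"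

-- ===== PRECONDITION & SPEC =====
def Spec_classify_rule_based (item : String) (out : String) : Prop := out = classify_rule_based_alt item
instance (item : String) (out : String) : Decidable (Spec_classify_rule_based item out) := by unfold Spec_classify_rule_based; infer_instance

-- ===== CLAIM (what is proved, stated in full; the proofs are below) =====
def Claim_equal_classify_rule_based : Prop := ∀ (item : String), Dom_classify_rule_based item → Spec_classify_rule_based item (classify_rule_based item)

-- ===== LEMMAS AND PROOFS =====

-- membership after the inner keyword loop
theorem mem_innerScan (tail : List Char) (f : PySem.Set String) (w : String) :
    w ∈ innerScan tail f ↔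
      w ∈ f ∨ (w ∈ kwLabels.map Prod.fst ∧ PySem.Chars.startswith tail w.toList = true) := by
  unfold innerScan
  generalize kwLabels = kws
  induction kws generalizing f with
  | nil => simp
  | cons p kws ih =>
    simp only [List.foldl_cons, List.map_cons, List.mem_cons]
    by_cases hs : PySem.Chars.startswith tail p.1.toList = true
    · rw [if_pos hs, ih]
      simp only [PySem.Set.mem_add]
      constructor
      · rintro (⟨h | h⟩ | h)
        · exact Or.inl h
        · exact Or.inr ⟨Or.inl h, by rw [h]; exact hs⟩
        · exact Or.inr ⟨Or.inr h.1, h.2⟩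
      · rintro (h | ⟨h | h, hw⟩)
        · exact Or.inl (Or.inl h)
        · exact Or.inl (Or.inr h)
        · exact Or.inr ⟨h, hw⟩
    · rw [if_neg hs, ih]
      constructor
      · rintro (h | h)
        · exact Or.inl h
        · exact Or.inr ⟨Or.inr h.1, h.2⟩
      · rintro (h | ⟨h | h, hw⟩)
        · exact Or.inl h
        · exact absurd (h ▸ hw) hs
        · exact Or.inr ⟨h, hw⟩

-- membership after the outer text scan, for an arbitrary index list
theorem mem_scan_fold (cs : List Char) (is : List Int) (f : PySem.Set String) (w : String) :
    w ∈ is.foldl (fun f i => innerScan (cs.drop i.toNat) f) f ↔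
      w ∈ f ∨ ∃ i ∈ is, w ∈ kwLabels.map Prod.fst ∧
        PySem.Chars.startswith (cs.drop i.toNat) w.toList = true := by
  induction is generalizing f with
  | nil => simp
  | cons i is ih =>
    simp only [List.foldl_cons, ih, mem_innerScan, List.mem_cons]
    constructor
    · rintro ((h | h) | ⟨j, hj, hw⟩)
      · exact Or.inl h
      · exact Or.inr ⟨i, Or.inl rfl, h⟩
      · exact Or.inr ⟨j, Or.inr hj, hw⟩
    · rintro (h | ⟨j, hj | hj, hw⟩)
      · exact Or.inl (Or.inl h)
      · exact Or.inl (Or.inr (hj ▸ hw))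
      · exact Or.inr ⟨j, hj, hw⟩

-- found = the table keywords that occur in the (lowered) text
theorem mem_scanFound (cs : List Char) (w : String) (hw : w.toList ≠ []) :
    w ∈ scanFound cs ↔
      w ∈ kwLabels.map Prod.fst ∧ PySem.Chars.isIn w.toList cs = true := by
  unfold scanFound
  rw [mem_scan_fold]
  constructor
  · rintro (h | ⟨i, hi, hmem, hs⟩)
    · simp [PySem.Set.empty] at h
    · refine ⟨hmem, ?_⟩
      rw [← PySem.Chars.exists_prefix_drop_iff_isIn]
      exact ⟨i.toNat, (PySem.Chars.startswith_iff _ _).mp hs⟩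
  · rintro ⟨hmem, hin⟩
    rw [← PySem.Chars.exists_prefix_drop_iff_isIn] at hin
    obtain ⟨j, hj⟩ := hin
    have hjlt : j < cs.length := by
      by_contra hge
      rw [List.drop_eq_nil_of_le (le_of_not_gt hge)] at hj
      exact hw (List.prefix_nil.mp hj)
    refine Or.inr ⟨(j : Int), ?_, hmem, (PySem.Chars.startswith_iff _ _).mpr (by simpa using hj)⟩
    rw [PySem.List.mem_pyRange_one]
    omega

-- each table keyword is nonempty (used to apply mem_scanFound pointwise)
theorem kwLabels_fst_ne_nil : ∀ p ∈ kwLabels, p.1.toList ≠ [] := by decide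

-- a label's score over the found set = a membership count over the table
theorem labScore_eq (cs : List Char) (lab : String) :
    labScore (scanFound cs) lab =
      (kwLabels.countP (fun p => p.2 == lab && PySem.Chars.isIn p.1.toList cs) : Int) := by
  unfold labScore
  congr 1
  apply List.countP_congr
  intro p hp
  have h := mem_scanFound cs p.1 (kwLabels_fst_ne_nil p hp)
  have hmem : p.1 ∈ kwLabels.map Prod.fst := List.mem_map_of_mem hp
  by_cases hin : PySem.Chars.isIn p.1.toList cs = true
  · simp [h.mpr ⟨hmem, hin⟩, hin]
  · have hnm : p.1 ∉ scanFound cs := fun hc => hin (h.mp hc).2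
    simp [hnm, hin]

-- the three concrete label scores reduce to A's per-category keyword counts
set_option maxHeartbeats 1000000 in
theorem labScore_wet (cs : List Char) :
    labScore (scanFound cs) "wet" =
      (wet_keywords.countP (fun w => PySem.Chars.isIn w.toList cs) : Int) := by
  rw [labScore_eq]
  simp [kwLabels, wet_keywords, List.countP_cons]

set_option maxHeartbeats 1000000 in
theorem labScore_dry (cs : List Char) :
    labScore (scanFound cs) "dry" =
      (dry_keywords.countP (fun w => PySem.Chars.isIn w.toList cs) : Int) := by
  rw [labScore_eq]
  simp [kwLabels, dry_keywords, List.countP_cons]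

set_option maxHeartbeats 1000000 in
theorem labScore_ew (cs : List Char) :
    labScore (scanFound cs) "e-waste" =
      (ewaste_keywords.countP (fun w => PySem.Chars.isIn w.toList cs) : Int) := by
  rw [labScore_eq]
  simp [kwLabels, ewaste_keywords, List.countP_cons]

-- the three-step unique-argmax fold equals A's strict pairwise chain
set_option maxHeartbeats 1000000 in
theorem pickFold_eq (found : PySem.Set String) (wc dc ec : Int)
    (hw : labScore found "wet" = wc) (hd : labScore found "dry" = dc)
    (he : labScore found "e-waste" = ec) :
    (if (pickFold found).2.2 = true then (pickFold found).1 else "unknown") =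
    (if wc > dc ∧ wc > ec then "wet"
     else if dc > wc ∧ dc > ec then "dry"
     else if ec > wc ∧ ec > dc then "e-waste"
     else "unknown") := by
  unfold pickFold
  simp only [labelsB, List.foldl_cons, List.foldl_nil, beq_iff_eq]
  rw [hw, hd, he]
  rcases lt_trichotomy wc dc with h1 | h1 | h1
  · simp only [if_pos h1]
    rcases lt_trichotomy dc ec with h2 | h2 | h2
    · simp only [if_pos h2, if_neg (show ¬(wc > dc ∧ wc > ec) by omega),
        if_neg (show ¬(dc > wc ∧ dc > ec) by omega),
        if_pos (show ec > wc ∧ ec > dc by omega)]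
      simp
    · simp only [if_neg (show ¬(dc < ec) by omega), if_pos h2.symm,
        if_neg (show ¬(wc > dc ∧ wc > ec) by omega),
        if_neg (show ¬(dc > wc ∧ dc > ec) by omega),
        if_neg (show ¬(ec > wc ∧ ec > dc) by omega)]
      simp
    · simp only [if_neg (show ¬(dc < ec) by omega), if_neg (show ¬(ec = dc) by omega),
        if_neg (show ¬(wc > dc ∧ wc > ec) by omega),
        if_pos (show dc > wc ∧ dc > ec by omega)]
      simp
  · simp only [if_neg (show ¬(wc < dc) by omega), if_pos h1.symm]
    rcases lt_trichotomy wc ec with h2 | h2 | h2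
    · simp only [if_pos h2, if_neg (show ¬(wc > dc ∧ wc > ec) by omega),
        if_neg (show ¬(dc > wc ∧ dc > ec) by omega),
        if_pos (show ec > wc ∧ ec > dc by omega)]
      simp
    · simp only [if_neg (show ¬(wc < ec) by omega), if_pos h2.symm,
        if_neg (show ¬(wc > dc ∧ wc > ec) by omega),
        if_neg (show ¬(dc > wc ∧ dc > ec) by omega),
        if_neg (show ¬(ec > wc ∧ ec > dc) by omega)]
      simp
    · simp only [if_neg (show ¬(wc < ec) by omega), if_neg (show ¬(ec = wc) by omega),
        if_neg (show ¬(wc > dc ∧ wc > ec) by omega),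
        if_neg (show ¬(dc > wc ∧ dc > ec) by omega),
        if_neg (show ¬(ec > wc ∧ ec > dc) by omega)]
      simp
  · simp only [if_neg (show ¬(wc < dc) by omega), if_neg (show ¬(dc = wc) by omega)]
    rcases lt_trichotomy wc ec with h2 | h2 | h2
    · simp only [if_pos h2, if_neg (show ¬(wc > dc ∧ wc > ec) by omega),
        if_neg (show ¬(dc > wc ∧ dc > ec) by omega),
        if_pos (show ec > wc ∧ ec > dc by omega)]
      simp
    · simp only [if_neg (show ¬(wc < ec) by omega), if_pos h2.symm,
        if_neg (show ¬(wc > dc ∧ wc > ec) by omega),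
        if_neg (show ¬(dc > wc ∧ dc > ec) by omega),
        if_neg (show ¬(ec > wc ∧ ec > dc) by omega)]
      simp
    · simp only [if_neg (show ¬(wc < ec) by omega), if_neg (show ¬(ec = wc) by omega),
        if_pos (show wc > dc ∧ wc > ec by omega)]
      simp

-- ===== VERDICT (by name: the statement is the Claim_ definition above) =====
set_option maxHeartbeats 1000000 in
theorem classify_rule_based_spec : Claim_equal_classify_rule_based := by
  intro item _
  unfold Spec_classify_rule_based classify_rule_based classify_rule_based_alt
  rw [pickFold_eq _ _ _ _ (labScore_wet _) (labScore_dry _) (labScore_ew _)]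
  simp only [PySem.List.sum_map_ite_one_zero, PySem.Str.isIn_eq, PySem.Str.toList_lower]
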